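-- pv_equiv track=rewrite | github.com/alexgmex/WAMCalculator | functions.py | create_course_list
-- ===== SOURCE A (Python) =====
-- def create_course_list(raw):
--     # Add in missing marks for any non-marked subjects
--     course = []
--     for x in raw:
--         if x == "SR" or x == "FR":
--             course.append("0.0")
--         course.append(x)
--
--     # Split into 2d array
--     course = [course[i:i + 7] for i in range(0, len(course), 7)]
--
--     return course
-- ===== SOURCE B (Python) =====
-- def create_course_list(raw):
--     # One pass: maintain the current row, flush to rows whenever it fills to 7.
--     rows = []
--     cur = []
--     for x in raw:
--         if x == "SR" or x == "FR":
--             cur.append("0.0")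
--             if len(cur) == 7:
--                 rows.append(cur)
--                 cur = []
--         cur.append(x)
--         if len(cur) == 7:
--             rows.append(cur)
--             cur = []
--     if cur:
--         rows.append(cur)
--     return rows
-- ===== Notes on version B (the rewrite author's own statement) =====
-- stated objective: alternative
-- what changed: B fuses A's two phases (build a flat list, then slice it into 7-chunks by index comprehension) into one pass over raw that maintains a current row and flushes it to the result whenever it fills to 7, with no intermediate flat list and no slicing.
import Mathlib
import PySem

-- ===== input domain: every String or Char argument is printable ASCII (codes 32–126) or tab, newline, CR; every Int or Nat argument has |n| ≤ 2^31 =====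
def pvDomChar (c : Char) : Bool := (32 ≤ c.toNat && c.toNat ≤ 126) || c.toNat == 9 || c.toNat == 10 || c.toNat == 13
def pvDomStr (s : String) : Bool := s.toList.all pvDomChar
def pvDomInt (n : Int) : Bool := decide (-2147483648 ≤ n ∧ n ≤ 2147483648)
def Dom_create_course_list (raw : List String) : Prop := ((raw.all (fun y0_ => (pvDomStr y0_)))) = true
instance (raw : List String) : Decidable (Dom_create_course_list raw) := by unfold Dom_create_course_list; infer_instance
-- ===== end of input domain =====

-- B fuses A's two phases (flat list, then slice into 7-chunks) into one pass that
-- maintains the current row and flushes it whenever it fills to 7 (objective: alternative).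

-- ===== PORT A =====
-- A, phase 1: course accumulated by appending "0.0" before each "SR"/"FR", then x
def cclA_flat (raw : List String) : List String :=
  raw.foldl (fun course x =>
    (if x == "SR" || x == "FR" then course ++ ["0.0"] else course) ++ [x]) []

-- A, phase 2: [course[i:i+7] for i in range(0, len(course), 7)]
def create_course_list (raw : List String) : List (List String) :=
  let course := cclA_flat raw
  (PySem.List.pyRange 0 course.length 7).map
    (fun i => PySem.List.slice course (some i) (some (i + 7)))

-- ===== PORT B =====
-- append one value to the current row, flushing it to rows if it reaches 7
def cclB_push (st : List (List String) × List String) (v : String) :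
    List (List String) × List String :=
  let cur := st.2 ++ [v]
  if cur.length == 7 then (st.1 ++ [cur], []) else (st.1, cur)

def create_course_list_alt (raw : List String) : List (List String) :=
  let st := raw.foldl (fun st x =>
    cclB_push (if x == "SR" || x == "FR" then cclB_push st "0.0" else st) x) ([], [])
  if st.2.isEmpty then st.1 else st.1 ++ [st.2]

-- ===== PRECONDITION & SPEC =====
def Spec_create_course_list (raw : List String) (out : List (List String)) : Prop := out = create_course_list_alt raw
instance (raw : List String) (out : List (List String)) : Decidable (Spec_create_course_list raw out) := by unfold Spec_create_course_list; infer_instance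

-- ===== CLAIM (what is proved, stated in full; the proofs are below) =====
def Claim_equal_create_course_list : Prop := ∀ (raw : List String), Dom_create_course_list raw → Spec_create_course_list raw (create_course_list raw)

-- ===== LEMMAS AND PROOFS =====

-- Proof-only reference form: greedy 7-chunking of a list.
def chunk7 (l : List String) : List (List String) :=
  if h : l = [] then [] else l.take 7 :: chunk7 (l.drop 7)
termination_by l.length
decreasing_by
  simp only [List.length_drop]
  have : 0 < l.length := List.length_pos_iff.mpr h
  omega

-- the flat list both versions chunk
def cclFlat (raw : List String) : List String :=
  raw.flatMap (fun x => if x == "SR" || x == "FR" then ["0.0", x] else [x])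

lemma cclA_flat_aux (raw : List String) (init : List String) :
    raw.foldl (fun course x =>
        (if x == "SR" || x == "FR" then course ++ ["0.0"] else course) ++ [x]) init
      = init ++ cclFlat raw := by
  induction raw generalizing init with
  | nil => simp [cclFlat]
  | cons x xs ih =>
    simp only [List.foldl_cons, cclFlat, List.flatMap_cons] at *
    rw [ih]
    by_cases h : x == "SR" || x == "FR" <;> simp [h]

lemma cclA_flat_eq (raw : List String) : cclA_flat raw = cclFlat raw := by
  unfold cclA_flat
  simpa using cclA_flat_aux raw []

-- range(a, b, s) with positive step, as a cons
lemma pyRange_pos_cons {a b s : Int} (hs : 0 < s) (hab : a < b) :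
    PySem.List.pyRange a b s = a :: PySem.List.pyRange (a + s) b s := by
  rw [PySem.List.pyRange_of_pos a b hs, PySem.List.pyRange_of_pos (a + s) b hs]
  have hcount : (if a < b then ((b - a + s - 1) / s).toNat else 0)
      = (if a + s < b then ((b - (a + s) + s - 1) / s).toNat else 0) + 1 := by
    rw [if_pos hab]
    by_cases h2 : a + s < b
    · rw [if_pos h2]
      have : b - a + s - 1 = (b - (a + s) + s - 1) + 1 * s := by ring
      rw [this, Int.add_mul_ediv_right _ _ (by omega : s ≠ 0)]
      have hnn : 0 ≤ (b - (a + s) + s - 1) / s :=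
        Int.ediv_nonneg (by omega) (by omega)
      omega
    · rw [if_neg h2]
      have h1 : 0 < b - a + s - 1 := by omega
      have h2' : b - a + s - 1 < 2 * s := by omega
      have hlo : 1 ≤ (b - a + s - 1) / s := by
        have := Int.ediv_le_ediv hs (by omega : s ≤ b - a + s - 1)
        simpa [Int.ediv_self (by omega : s ≠ 0)] using this
      have hhi : (b - a + s - 1) / s < 2 := by
        have := Int.ediv_lt_of_lt_mul hs (by omega : b - a + s - 1 < 2 * s)
        omega
      omega
  rw [hcount, List.range_succ_eq_map, List.map_cons]
  simp only [Nat.cast_zero, mul_zero, add_zero, List.map_map]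
  congr 1
  apply List.map_congr_left
  intro k _
  simp only [Function.comp_apply, Nat.succ_eq_add_one, Nat.cast_add, Nat.cast_one]
  ring

-- shifting a positive-step range by s
lemma pyRange_pos_shift {a a' b s : Int} (hs : 0 < s) (ha : a' = a + s) :
    PySem.List.pyRange a' b s = (PySem.List.pyRange a (b - s) s).map (· + s) := by
  subst ha
  rw [PySem.List.pyRange_of_pos (a + s) b hs, PySem.List.pyRange_of_pos a (b - s) hs]
  have hc : (a + s < b) ↔ (a < b - s) := by omega
  have hv : b - (a + s) + s - 1 = b - s - a + s - 1 := by ring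
  simp only [hc, hv, List.map_map]
  apply List.map_congr_left
  intro k _
  simp only [Function.comp_apply]
  ring

-- A's comprehension is greedy 7-chunking
lemma slices_eq_chunk7 (course : List String) :
    (PySem.List.pyRange 0 (course.length : Int) 7).map
      (fun i => PySem.List.slice course (some i) (some (i + 7))) = chunk7 course := by
  by_cases hnil : course = []
  · subst hnil
    rw [chunk7]
    rw [PySem.List.pyRange_of_pos _ _ (by norm_num : (0:Int) < 7)]
    simp
  · have hlen : 0 < course.length := List.length_pos_iff.mpr hnil
    rw [chunk7, dif_neg hnil]
    rw [pyRange_pos_cons (by norm_num) (by exact_mod_cast hlen)]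
    rw [List.map_cons]
    have hhead : PySem.List.slice course (some 0) (some (0 + 7)) = course.take 7 := by
      rw [PySem.List.slice_zero_start, PySem.List.slice_to course (by norm_num)]
      rfl
    rw [hhead]
    congr 1
    rw [pyRange_pos_shift (by norm_num) (show (0:Int) + 7 = 0 + 7 from rfl), List.map_map]
    have htail : ∀ i ∈ PySem.List.pyRange 0 ((course.length : Int) - 7) 7,
        ((fun i => PySem.List.slice course (some i) (some (i + 7))) ∘ (· + 7)) i
          = PySem.List.slice (course.drop 7) (some i) (some (i + 7)) := by
      intro i hi
      obtain ⟨hi0, _, _⟩ := PySem.List.mem_pyRange_of_pos (by norm_num) hi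
      simp only [Function.comp_apply]
      rw [PySem.List.slice_toNat course (by omega) (by omega),
          PySem.List.slice_toNat (course.drop 7) hi0 (by omega)]
      rw [List.drop_drop]
      congr 1
      · omega
      · congr 1; omega
    rw [List.map_congr_left htail]
    by_cases h : 7 ≤ course.length
    · have hlen7 : ((course.drop 7).length : Int) = (course.length : Int) - 7 := by
        simp only [List.length_drop]; omega
      rw [← hlen7, slices_eq_chunk7 (course.drop 7)]
    · have hnilr : PySem.List.pyRange 0 ((course.length : Int) - 7) 7 = [] := by
        rw [PySem.List.pyRange_of_pos _ _ (by norm_num : (0:Int) < 7)]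
        rw [if_neg (by omega)]
        simp
      have hd : course.drop 7 = [] := by
        apply List.eq_nil_of_length_eq_zero
        simp only [List.length_drop]; omega
      rw [hnilr, hd, chunk7]
      simp
termination_by course.length
decreasing_by
  simp only [List.length_drop]; omega

-- B's finishing step
def cclFinish (st : List (List String) × List String) : List (List String) :=
  if st.2.isEmpty then st.1 else st.1 ++ [st.2]

-- B's fold over raw equals a fold of cclB_push over the flat list
lemma cclB_fold_flat (raw : List String) (st : List (List String) × List String) :
    raw.foldl (fun st x =>
        cclB_push (if x == "SR" || x == "FR" then cclB_push st "0.0" else st) x) st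
      = (cclFlat raw).foldl cclB_push st := by
  induction raw generalizing st with
  | nil => rfl
  | cons x xs ih =>
    simp only [List.foldl_cons, cclFlat, List.flatMap_cons, List.foldl_append]
    rw [ih]
    by_cases h : x == "SR" || x == "FR" <;> simp [h, cclFlat]

-- a full row at the front chunks off exactly
lemma chunk7_full (c : List String) (hc : c.length = 7) (l : List String) :
    chunk7 (c ++ l) = c :: chunk7 l := by
  rw [chunk7, dif_neg (by simp [← List.length_pos_iff, hc])]
  rw [List.take_left' hc, List.drop_left' hc]

-- the loop invariant: a partial current row chunks the rest greedily
lemma cclB_invariant (l : List String) (rows : List (List String)) (cur : List String)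
    (hcur : cur.length < 7) :
    cclFinish (l.foldl cclB_push (rows, cur)) = rows ++ chunk7 (cur ++ l) := by
  induction l generalizing rows cur with
  | nil =>
    simp only [List.foldl_nil, List.append_nil, cclFinish]
    by_cases h : cur = []
    · simp [h, chunk7]
    · rw [chunk7, dif_neg h]
      have ht : cur.take 7 = cur := List.take_of_length_le (by omega)
      have hd : cur.drop 7 = [] := by
        apply List.eq_nil_of_length_eq_zero
        simp only [List.length_drop]; omega
      rw [ht, hd, chunk7]
      simp [List.isEmpty_iff, h]
  | cons v l ih =>
    simp only [List.foldl_cons]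
    by_cases h7 : (cur ++ [v]).length = 7
    · have hst : cclB_push (rows, cur) v = (rows ++ [cur ++ [v]], []) := by
        simp [cclB_push, h7]
      rw [hst, ih _ [] (by norm_num),
          show cur ++ v :: l = (cur ++ [v]) ++ l by simp,
          chunk7_full (cur ++ [v]) h7 l]
      simp
    · have hlt : (cur ++ [v]).length < 7 := by
        simp only [List.length_append, List.length_cons, List.length_nil] at h7 ⊢
        omega
      have hst : cclB_push (rows, cur) v = (rows, cur ++ [v]) := by
        have h6 : cur.length ≠ 6 := by
          simp only [List.length_append, List.length_cons, List.length_nil] at h7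
          omega
        simp [cclB_push, h6]
      rw [hst, ih rows _ hlt]
      simp

-- ===== VERDICT (by name: the statement is the Claim_ definition above) =====
theorem create_course_list_spec : Claim_equal_create_course_list := by
  intro raw _
  unfold Spec_create_course_list create_course_list create_course_list_alt
  simp only []
  rw [cclA_flat_eq, slices_eq_chunk7, cclB_fold_flat]
  have := cclB_invariant (cclFlat raw) [] [] (by norm_num)
  simpa [cclFinish] using this.symm
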